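-- pv_equiv track=rewrite | github.com/rosxz/packagerix | src/vibenix/tools/search_nixpkgs_manual.py | _get_first_paragraph
-- ===== SOURCE A (Python) =====
-- from typing import List
--
-- def _get_first_paragraph(section_lines: List[str]) -> List[str]:
--     """Extract only the first paragraph from a section's content."""
--     paragraph_lines = []
--     found_content = False
--
--     for line in section_lines:
--         stripped_line = line.strip()
--
--         # Skip empty lines at the beginning
--         if not found_content and not stripped_line:
--             continue
--
--         # Found the start of content
--         if not found_content and stripped_line:
--             found_content = True
--
--         # If we hit an empty line after finding content, we've reached the end of first paragraph
--         if found_content and not stripped_line: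
--             break
--
--         # Add the line if we're in the first paragraph
--         if found_content:
--             paragraph_lines.append(line)
--
--     # Add a blank line after the paragraph for spacing
--     if paragraph_lines:
--         paragraph_lines.append('')
--
--     return paragraph_lines
-- ===== SOURCE B (Python) =====
-- from typing import List
--
-- def _get_first_paragraph(section_lines: List[str]) -> List[str]:
--     """Extract only the first paragraph from a section's content."""
--     n = len(section_lines)
--     i = 0
--     while i < n and not section_lines[i].strip():
--         i += 1
--     j = i
--     while j < n and section_lines[j].strip():
--         j += 1
--     return section_lines[i:j] + [''] if j > i else []
-- ===== Notes on version B (the rewrite author's own statement) =====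
-- stated objective: alternative
-- what changed: Replaces A's single flag-driven accumulate loop (found_content state, continue/break, per-line append) with two index scans - skip leading blank lines, then find the paragraph end - followed by one slice and a conditional trailing ''.
import Mathlib
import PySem

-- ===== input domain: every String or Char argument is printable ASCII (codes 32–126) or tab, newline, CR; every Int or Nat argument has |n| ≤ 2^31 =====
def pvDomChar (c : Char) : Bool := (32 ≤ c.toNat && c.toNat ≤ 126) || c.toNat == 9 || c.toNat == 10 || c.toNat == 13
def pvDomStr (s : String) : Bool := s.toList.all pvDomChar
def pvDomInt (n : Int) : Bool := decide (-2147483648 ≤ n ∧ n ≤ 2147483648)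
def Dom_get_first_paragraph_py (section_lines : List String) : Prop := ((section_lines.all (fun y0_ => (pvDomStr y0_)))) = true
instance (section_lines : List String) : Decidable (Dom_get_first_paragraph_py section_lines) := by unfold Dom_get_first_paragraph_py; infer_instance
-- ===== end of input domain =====

-- B replaces A's flag-driven accumulate loop by two index scans (skip blanks, find paragraph end) and one slice; same value, proved equal on all inputs (alternative decomposition, same cost).

-- ===== PORT A =====
-- the for-loop of A: state = (paragraph_lines, found_content); 'continue' = recurse unchanged,
-- 'break' = return the accumulator
def pvLoopA : List String → List String → Bool → List String
  | [], acc, _ => acc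
  | line :: rest, acc, found =>
    let s := PySem.Str.strip line
    if !found && (s == "") then pvLoopA rest acc found
    else
      let found' := if !found && !(s == "") then true else found
      if found' && (s == "") then acc
      else if found' then pvLoopA rest (acc ++ [line]) found'
      else pvLoopA rest acc found'

def get_first_paragraph_py (section_lines : List String) : List String :=
  let paragraph_lines := pvLoopA section_lines [] false
  if paragraph_lines ≠ [] then paragraph_lines ++ [""] else paragraph_lines

-- ===== PORT B =====
-- first while loop: advance i while section_lines[i].strip() is empty
def pvSkipBlank (xs : List String) (i : Nat) : Nat :=
  if h : i < xs.length then
    if PySem.Str.strip (xs.getD i "") == "" then pvSkipBlank xs (i + 1) else i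
  else i
termination_by xs.length - i

-- second while loop: advance j while section_lines[j].strip() is non-empty
def pvFindEnd (xs : List String) (j : Nat) : Nat :=
  if h : j < xs.length then
    if PySem.Str.strip (xs.getD j "") == "" then j else pvFindEnd xs (j + 1)
  else j
termination_by xs.length - j

def get_first_paragraph_py_alt (section_lines : List String) : List String :=
  let i := pvSkipBlank section_lines 0
  let j := pvFindEnd section_lines i
  if j > i then PySem.List.slice section_lines (some (i : Int)) (some (j : Int)) ++ [""] else []

-- ===== PRECONDITION & SPEC =====
def Spec_get_first_paragraph_py (section_lines : List String) (out : List String) : Prop := out = get_first_paragraph_py_alt section_lines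
instance (section_lines : List String) (out : List String) : Decidable (Spec_get_first_paragraph_py section_lines out) := by unfold Spec_get_first_paragraph_py; infer_instance

-- ===== CLAIM (what is proved, stated in full; the proofs are below) =====
def Claim_equal_get_first_paragraph_py : Prop := ∀ (section_lines : List String), Dom_get_first_paragraph_py section_lines → Spec_get_first_paragraph_py section_lines (get_first_paragraph_py section_lines)

-- ===== LEMMAS AND PROOFS =====

-- blank-line predicate shared by the proofs
def pvBlank (l : String) : Bool := PySem.Str.strip l == ""

-- once found_content is true, A's loop takes lines while non-blank (appended to the accumulator)
theorem pvLoopA_true (xs : List String) : ∀ acc, pvLoopA xs acc true = acc ++ xs.takeWhile (fun l => !pvBlank l) := by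
  induction xs with
  | nil => intro acc; simp [pvLoopA]
  | cons l rest ih =>
    intro acc
    by_cases hs : PySem.Str.strip l == ""
    · simp [pvLoopA, pvBlank, List.takeWhile_cons, hs]
    · simp [pvLoopA, pvBlank, List.takeWhile_cons, hs, ih]

-- before content is found, A's loop is takeWhile non-blank ∘ dropWhile blank
theorem pvLoopA_false (xs : List String) :
    pvLoopA xs [] false = (xs.dropWhile pvBlank).takeWhile (fun l => !pvBlank l) := by
  induction xs with
  | nil => simp [pvLoopA]
  | cons l rest ih =>
    by_cases hs : PySem.Str.strip l == ""
    · simp [pvLoopA, pvBlank, List.dropWhile_cons, hs, ih]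
    · simp [pvLoopA, pvBlank, List.dropWhile_cons, List.takeWhile_cons, hs, pvLoopA_true]

-- the first scan computes 0 + the length of the leading blank run from i
theorem pvSkipBlank_spec (xs : List String) : ∀ k i, xs.length - i ≤ k →
    pvSkipBlank xs i = i + ((xs.drop i).takeWhile pvBlank).length := by
  intro k
  induction k with
  | zero =>
    intro i hi
    have hlen : xs.length ≤ i := by omega
    rw [pvSkipBlank]
    simp [Nat.not_lt.mpr hlen, List.drop_eq_nil_of_le hlen]
  | succ k ih =>
    intro i hi
    rw [pvSkipBlank]
    by_cases h : i < xs.length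
    · have hd : xs.drop i = xs[i] :: xs.drop (i + 1) := List.drop_eq_getElem_cons h
      rw [List.getD_eq_getElem xs "" h]
      by_cases hs : PySem.Str.strip xs[i] == ""
      · have h1 : (xs.drop i).takeWhile pvBlank = xs[i] :: (xs.drop (i + 1)).takeWhile pvBlank := by
          rw [hd, List.takeWhile_cons]; simp [pvBlank, hs]
        simp only [h, dif_pos, hs, if_pos]
        rw [ih (i + 1) (by omega), h1]
        simp; omega
      · have h1 : (xs.drop i).takeWhile pvBlank = [] := by
          rw [hd, List.takeWhile_cons]; simp [pvBlank, hs]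
        simp only [h, dif_pos, hs, h1, List.length_nil, Nat.add_zero]
        simp
    · simp [h, List.drop_eq_nil_of_le (by omega : xs.length ≤ i)]

-- the second scan computes j + the length of the non-blank run from j
theorem pvFindEnd_spec (xs : List String) : ∀ k j, xs.length - j ≤ k →
    pvFindEnd xs j = j + ((xs.drop j).takeWhile (fun l => !pvBlank l)).length := by
  intro k
  induction k with
  | zero =>
    intro j hj
    have hlen : xs.length ≤ j := by omega
    rw [pvFindEnd]
    simp [Nat.not_lt.mpr hlen, List.drop_eq_nil_of_le hlen]
  | succ k ih =>
    intro j hj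
    rw [pvFindEnd]
    by_cases h : j < xs.length
    · have hd : xs.drop j = xs[j] :: xs.drop (j + 1) := List.drop_eq_getElem_cons h
      rw [List.getD_eq_getElem xs "" h]
      by_cases hs : PySem.Str.strip xs[j] == ""
      · have h1 : (xs.drop j).takeWhile (fun l => !pvBlank l) = [] := by
          rw [hd, List.takeWhile_cons]; simp [pvBlank, hs]
        simp only [h, dif_pos, hs, h1, List.length_nil, Nat.add_zero]
        simp
      · have h1 : (xs.drop j).takeWhile (fun l => !pvBlank l)
            = xs[j] :: (xs.drop (j + 1)).takeWhile (fun l => !pvBlank l) := by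
          rw [hd, List.takeWhile_cons]; simp [pvBlank, hs]
        simp only [h, dif_pos, hs, if_neg]
        rw [ih (j + 1) (by omega), h1]
        simp; omega
    · simp [h, List.drop_eq_nil_of_le (by omega : xs.length ≤ j)]

-- dropWhile is drop of the takeWhile length
theorem pvDropWhile_eq_drop (p : String → Bool) (xs : List String) :
    xs.dropWhile p = xs.drop (xs.takeWhile p).length := by
  induction xs with
  | nil => simp
  | cons l rest ih =>
    by_cases hp : p l
    · simp [List.dropWhile_cons, List.takeWhile_cons, hp, ih]
    · simp [List.dropWhile_cons, List.takeWhile_cons, hp]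

-- take of the takeWhile length is takeWhile
theorem pvTake_takeWhile (p : String → Bool) (xs : List String) :
    xs.take (xs.takeWhile p).length = xs.takeWhile p := by
  induction xs with
  | nil => simp
  | cons l rest ih =>
    by_cases hp : p l
    · simp [List.takeWhile_cons, hp, ih]
    · simp [List.takeWhile_cons, hp]

-- ===== VERDICT (by name: the statement is the Claim_ definition above) =====
theorem get_first_paragraph_py_spec : Claim_equal_get_first_paragraph_py := by
  intro xs _
  unfold Spec_get_first_paragraph_py get_first_paragraph_py get_first_paragraph_py_alt
  rw [pvLoopA_false, pvSkipBlank_spec xs (xs.length - 0) 0 le_rfl]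
  simp only [Nat.zero_add, List.drop_zero]
  rw [pvFindEnd_spec xs (xs.length - (xs.takeWhile pvBlank).length) _ le_rfl]
  push_cast
  rw [PySem.List.slice_natCast_add, pvDropWhile_eq_drop pvBlank xs, pvTake_takeWhile]
  by_cases h : ((xs.drop (xs.takeWhile pvBlank).length).takeWhile (fun l => !pvBlank l)) = []
  · simp [h]
  · have : ((xs.drop (xs.takeWhile pvBlank).length).takeWhile (fun l => !pvBlank l)).length > 0 :=
      List.length_pos_iff.mpr h
    simp [h, this]
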